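-- pv_equiv track=rewrite | github.com/GuudMan/Algorithm | 题目/获取字符串的统计字符串.py | ch_count
-- ===== SOURCE A (Python) =====
-- def ch_count(strs):
--     dict_strs = {}
--     res = ""
--     for i in strs:
--         dict_strs[i] = dict_strs[i] + 1 if i in dict_strs.keys() else 1
--
--     for key, value in dict_strs.items():
--         res += str(key) + "_" + str(value)
--         res += '_'
--
--     res = res[:-1]
--     return res
-- ===== SOURCE B (Python) =====
-- def ch_count(strs):
--     def go(chars):
--         if not chars:
--             return []
--         c = chars[0]
--         entry = "%s_%d" % (c, chars.count(c))
--         return [entry] + go([x for x in chars if x != c])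
--     return "_".join(go(list(strs)))
-- ===== Notes on version B (the rewrite author's own statement) =====
-- stated objective: alternative
-- what changed: Replaces A's single-pass dict accumulation plus concatenation loop with trailing-separator trim by a remove-and-recurse scheme: peel the first character, count all its occurrences via str/list.count, strip every occurrence, recurse on the remainder, and underscore-join the entries once.
import Mathlib
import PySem

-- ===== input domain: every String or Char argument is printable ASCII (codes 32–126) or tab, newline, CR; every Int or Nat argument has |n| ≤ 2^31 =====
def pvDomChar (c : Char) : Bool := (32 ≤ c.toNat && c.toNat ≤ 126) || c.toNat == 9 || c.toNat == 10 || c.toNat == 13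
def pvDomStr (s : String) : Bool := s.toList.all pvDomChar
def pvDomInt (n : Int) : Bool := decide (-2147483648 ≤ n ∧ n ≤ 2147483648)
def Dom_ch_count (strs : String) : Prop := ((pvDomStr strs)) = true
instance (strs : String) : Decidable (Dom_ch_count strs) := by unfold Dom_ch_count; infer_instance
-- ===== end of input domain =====

-- B replaces A's dict-counting pass + concatenation loop + trailing-separator trim by a
-- remove-and-recurse algorithm (peel the first char, count all its occurrences, strip them,
-- recurse on the remainder) with a single join (alternative algorithm, O(n*u), not faster).

-- ===== PORT A =====
def ch_count (strs : String) : String :=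
  let dict_strs : PySem.Dict Char Int :=
    strs.toList.foldl
      (fun d i => d.insert i (if d.contains i then d.getD i 0 + 1 else 1))
      PySem.Dict.empty
  let res : List Char :=
    dict_strs.items.foldl
      (fun res kv => (res ++ ([kv.1] ++ ['_'] ++ (PySem.Int.toStr kv.2).toList)) ++ ['_'])
      []
  String.ofList (PySem.List.slice res none (some (-1)))

-- ===== PORT B =====
-- go: peel chars[0], emit "c_count", recurse on chars with every occurrence of c removed
def chCountGo : List Char → List (List Char)
  | [] => []
  | c :: rest =>
    ([c] ++ ['_'] ++ (PySem.Int.toStr (PySem.List.count (c :: rest) c)).toList)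
      :: chCountGo ((c :: rest).filter (fun x => x ≠ c))
  termination_by xs => xs.length
  decreasing_by
    simp only [List.filter_cons]
    have : (decide (c ≠ c)) = false := by simp
    rw [this]
    exact Nat.lt_succ_of_le (List.length_filter_le _ _)

def ch_count_alt (strs : String) : String :=
  String.ofList (PySem.Chars.join ['_'] (chCountGo strs.toList))

-- ===== PRECONDITION & SPEC =====
def Spec_ch_count (strs : String) (out : String) : Prop := out = ch_count_alt strs
instance (strs : String) (out : String) : Decidable (Spec_ch_count strs out) := by unfold Spec_ch_count; infer_instance

-- ===== CLAIM (what is proved, stated in full; the proofs are below) =====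
def Claim_equal_ch_count : Prop := ∀ (strs : String), Dom_ch_count strs → Spec_ch_count strs (ch_count strs)

-- ===== LEMMAS AND PROOFS =====

-- A's counting loop is Counter(strs): when the key is absent, getD gives 0, so both branches insert getD+1.
theorem pv_count_loop_eq_counter (xs : List Char) :
    xs.foldl (fun d i => d.insert i (if d.contains i then d.getD i 0 + 1 else 1))
      PySem.Dict.empty = PySem.Dict.counter xs := by
  rw [← PySem.Dict.foldl_insert_getD_add_one_eq_counter]
  congr 1
  funext d i
  by_cases h : d.contains i = true
  · simp [h]
  · simp only [Bool.not_eq_true] at h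
    have hg : d.get? i = none := by
      have := PySem.Dict.contains_eq_isSome_get? (d := d) (k := i)
      rw [h] at this
      exact Option.isNone_iff_eq_none.mp (Option.isSome_eq_false_iff.mp this.symm)
    simp [h, PySem.Dict.getD, hg]

-- concat of (tᵢ ++ "_") then drop the last char = "_"-join of the tᵢ
theorem pv_foldl_underscore {α : Type} (g : α → List Char) (xs : List α) (acc : List Char) :
    xs.foldl (fun res x => (res ++ g x) ++ ['_']) acc
      = acc ++ (xs.map (fun x => g x ++ ['_'])).flatten := by
  induction xs generalizing acc with
  | nil => simp
  | cons x xs _ => simp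

theorem pv_dropLast_join (ts : List (List Char)) :
    ((ts.map (· ++ ['_'])).flatten).dropLast = PySem.Chars.join ['_'] ts := by
  induction ts with
  | nil => simp [PySem.Chars.join, List.intercalate]
  | cons t ts ih =>
    cases ts with
    | nil => simp [PySem.Chars.join, List.intercalate]
    | cons u us =>
      have hne : ((((u :: us).map (· ++ ['_']))).flatten) ≠ [] := by
        simp
      rw [List.map_cons, List.flatten_cons, List.dropLast_append_of_ne_nil hne, ih,
        PySem.Chars.join_cons_cons]

theorem pv_build {α : Type} (g : α → List Char) (xs : List α) :
    (xs.foldl (fun res x => (res ++ g x) ++ ['_']) []).dropLast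
      = PySem.Chars.join ['_'] (xs.map g) := by
  rw [pv_foldl_underscore, List.nil_append]
  have h : (fun x => g x ++ ['_']) = (fun t => t ++ ['_']) ∘ g := rfl
  rw [h, ← List.map_map, pv_dropLast_join]

-- pushing one distinct head through the Set-building fold
theorem pv_foldl_add_cons (xs : List Char) : ∀ (s : List Char) (a : Char),
    List.foldl PySem.Set.add (a :: s) xs
      = a :: List.foldl PySem.Set.add s (xs.filter (fun x => x ≠ a)) := by
  induction xs with
  | nil => intro s a; simp
  | cons x xs ih =>
    intro s a
    by_cases hx : x = a
    · subst hx
      have h1 : PySem.Set.add (x :: s) x = x :: s := by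
        simp [PySem.Set.add, PySem.Set.contains]
      have h2 : (decide (x ≠ x)) = false := by simp
      simp only [List.foldl_cons, List.filter_cons, h1, h2]
      exact ih s x
    · have h1 : PySem.Set.add (a :: s) x = a :: PySem.Set.add s x := by
        simp only [PySem.Set.add, PySem.Set.contains]
        simp [hx]
        split_ifs <;> simp
      have h2 : (decide (x ≠ a)) = true := by simp [hx]
      simp only [List.foldl_cons, List.filter_cons, h1, h2]
      exact ih (PySem.Set.add s x) a

-- first-seen dedup peels its head: set(c::rest) = c :: set of the rest with c removed
theorem pv_ofList_cons_filter (c : Char) (rest : List Char) :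
    PySem.Set.ofList (c :: rest)
      = c :: PySem.Set.ofList (rest.filter (fun x => x ≠ c)) := by
  rw [PySem.Set.ofList_eq_foldl, PySem.Set.ofList_eq_foldl]
  have h0 : PySem.Set.add ([] : List Char) c = [c] := by
    simp [PySem.Set.add, PySem.Set.contains]
  simp only [List.foldl_cons]
  rw [h0]
  exact pv_foldl_add_cons rest [] c

-- B's recursion computes exactly the first-seen keys with their total counts
theorem pv_go_eq : ∀ (n : Nat) (xs : List Char), xs.length ≤ n →
    chCountGo xs
      = (PySem.Set.ofList xs).map
          (fun k => [k] ++ ['_'] ++ (PySem.Int.toStr ((xs.count k : Nat) : Int)).toList) := by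
  intro n
  induction n with
  | zero =>
    intro xs h
    have : xs = [] := List.length_eq_zero_iff.mp (Nat.le_zero.mp h)
    subst this
    simp [chCountGo, PySem.Set.ofList_eq_foldl]
  | succ n ih =>
    intro xs h
    cases xs with
    | nil => simp [chCountGo, PySem.Set.ofList_eq_foldl]
    | cons c rest =>
      have hfilter : (c :: rest).filter (fun x => x ≠ c) = rest.filter (fun x => x ≠ c) := by
        simp
      have hlen : (rest.filter (fun x => x ≠ c)).length ≤ n := by
        have := List.length_filter_le (fun x => decide (x ≠ c)) rest
        have hr : rest.length ≤ n := Nat.le_of_succ_le_succ h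
        omega
      rw [chCountGo, hfilter, ih _ hlen, pv_ofList_cons_filter, List.map_cons]
      congr 1
      apply List.map_congr_left
      intro d hd
      have hdne : d ≠ c := by
        have hmem := (PySem.Set.mem_ofList _ _).mp hd
        exact of_decide_eq_true (List.mem_filter.mp hmem).2
      have hcount : (rest.filter (fun x => x ≠ c)).count d = (c :: rest).count d := by
        rw [List.count_filter (by simp [hdne])]
        simp [Ne.symm hdne]
      rw [hcount]

-- ===== VERDICT (by name: the statement is the Claim_ definition above) =====
theorem ch_count_spec : Claim_equal_ch_count := by
  intro strs _
  unfold Spec_ch_count ch_count ch_count_alt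
  dsimp only
  rw [pv_count_loop_eq_counter, PySem.Dict.items_counter]
  rw [List.foldl_map]
  dsimp only
  rw [PySem.List.slice_to_neg_one, pv_build]
  rw [pv_go_eq strs.toList.length strs.toList (le_refl _)]
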